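-- pv_equiv track=rewrite | github.com/ROCm/FlyDSL | kernels/moe_gemm_2stage_gfx1250.py | _pick_fp4_warp_shape
-- ===== SOURCE A (Python) =====
-- def _pick_fp4_warp_shape(tile_m: int, tile_n: int) -> tuple[int, int]:
--     """Pick a legal (m_warp, n_warp) for compile_mxfp4_gemm constraints."""
--     for m_warp in (4, 2, 1):
--         if tile_m % m_warp != 0:
--             continue
--         warp_tile_m = tile_m // m_warp
--         if (warp_tile_m % 16) != 0:
--             continue
--         for n_warp in (4, 2, 1):
--             if tile_n % n_warp != 0:
--                 continue
--             warp_tile_n = tile_n // n_warp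
--             if (warp_tile_n % 32) == 0:
--                 return m_warp, n_warp
--     raise ValueError(
--         f"Cannot find legal (m_warp,n_warp) for FP4 GEMM with tile_m={tile_m}, tile_n={tile_n}. "
--         "Need warp_tile_m multiple of 16 and warp_tile_n multiple of 32."
--     )
-- ===== SOURCE B (Python) =====
-- def _pick_fp4_warp_shape(tile_m: int, tile_n: int) -> tuple[int, int]:
--     """Pick a legal (m_warp, n_warp) for compile_mxfp4_gemm constraints."""
--     m_warp = next((m for m in (4, 2, 1)
--                    if tile_m % m == 0 and (tile_m // m) % 16 == 0), None)
--     n_warp = next((n for n in (4, 2, 1)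
--                    if tile_n % n == 0 and (tile_n // n) % 32 == 0), None)
--     if m_warp is None or n_warp is None:
--         raise ValueError(
--             f"Cannot find legal (m_warp,n_warp) for FP4 GEMM with tile_m={tile_m}, tile_n={tile_n}. "
--             "Need warp_tile_m multiple of 16 and warp_tile_n multiple of 32."
--         )
--     return m_warp, n_warp
-- ===== Notes on version B (the rewrite author's own statement) =====
-- stated objective: simpler
-- what changed: Replaces the nested m/n search (inner n-loop rerun for each candidate m) by two independent flat first-match searches, one over m-candidates and one over n-candidates, exploiting that the m- and n-constraints are independent.
import Mathlib
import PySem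

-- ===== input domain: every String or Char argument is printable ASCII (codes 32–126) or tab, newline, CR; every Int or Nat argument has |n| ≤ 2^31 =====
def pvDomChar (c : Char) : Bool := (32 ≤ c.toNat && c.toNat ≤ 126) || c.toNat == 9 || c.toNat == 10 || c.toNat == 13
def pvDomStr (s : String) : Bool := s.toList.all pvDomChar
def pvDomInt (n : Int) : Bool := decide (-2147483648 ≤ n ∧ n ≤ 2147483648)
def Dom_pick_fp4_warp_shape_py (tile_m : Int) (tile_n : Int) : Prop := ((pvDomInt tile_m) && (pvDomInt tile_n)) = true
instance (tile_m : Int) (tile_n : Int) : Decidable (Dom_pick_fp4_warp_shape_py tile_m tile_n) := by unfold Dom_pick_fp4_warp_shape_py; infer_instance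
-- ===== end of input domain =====

-- B replaces A's nested (m,n) search by two independent flat first-match searches
-- (legal since the m- and n-constraints are independent); equally fast, simpler.

-- ===== PORT A =====
-- inner 'for n_warp in (4, 2, 1)' loop of A: first n passing the n-constraints
def pickA_inner (tile_n : Int) : List Int → Option Int
  | [] => none
  | n :: rest =>
    if PySem.Int.mod tile_n n ≠ 0 then pickA_inner tile_n rest
    else if PySem.Int.mod (PySem.Int.floordiv tile_n n) 32 = 0 then some n
    else pickA_inner tile_n rest

-- outer 'for m_warp in (4, 2, 1)' loop of A
def pickA_outer (tile_m tile_n : Int) : List Int → Option (Int × Int)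
  | [] => none
  | m :: rest =>
    if PySem.Int.mod tile_m m ≠ 0 then pickA_outer tile_m tile_n rest
    else if PySem.Int.mod (PySem.Int.floordiv tile_m m) 16 ≠ 0 then pickA_outer tile_m tile_n rest
    else match pickA_inner tile_n [4, 2, 1] with
         | some n => some (m, n)
         | none => pickA_outer tile_m tile_n rest

-- falling off both loops raises ValueError → none; Pre_ excludes that, (0,0) is a dummy
def pick_fp4_warp_shape_py (tile_m : Int) (tile_n : Int) : Int × Int :=
  (pickA_outer tile_m tile_n [4, 2, 1]).getD (0, 0)

-- ===== PORT B =====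
-- port of B's 'next((x for x in (4,2,1) if <cond>), None)': first element satisfying the condition
def firstSuch (p : Int → Prop) [DecidablePred p] : List Int → Option Int
  | [] => none
  | x :: rest => if p x then some x else firstSuch p rest

def pick_fp4_warp_shape_py_alt (tile_m : Int) (tile_n : Int) : Int × Int :=
  let m_warp := firstSuch (fun m =>
    PySem.Int.mod tile_m m = 0 ∧ PySem.Int.mod (PySem.Int.floordiv tile_m m) 16 = 0) [4, 2, 1]
  let n_warp := firstSuch (fun n =>
    PySem.Int.mod tile_n n = 0 ∧ PySem.Int.mod (PySem.Int.floordiv tile_n n) 32 = 0) [4, 2, 1]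
  match m_warp, n_warp with
  | some m, some n => (m, n)
  | _, _ => (0, 0)  -- B raises ValueError here; excluded by Pre_

-- ===== PRECONDITION & SPEC =====
-- Pre_ excludes exactly the inputs on which A (and B) raise ValueError: no candidate in
-- (4,2,1) divides tile_m with quotient a multiple of 16, or none divides tile_n with
-- quotient a multiple of 32.
def Pre_pick_fp4_warp_shape_py (tile_m : Int) (tile_n : Int) : Prop :=
  ((PySem.Int.mod tile_m 4 = 0 ∧ PySem.Int.mod (PySem.Int.floordiv tile_m 4) 16 = 0) ∨
   (PySem.Int.mod tile_m 2 = 0 ∧ PySem.Int.mod (PySem.Int.floordiv tile_m 2) 16 = 0) ∨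
   PySem.Int.mod tile_m 16 = 0) ∧
  ((PySem.Int.mod tile_n 4 = 0 ∧ PySem.Int.mod (PySem.Int.floordiv tile_n 4) 32 = 0) ∨
   (PySem.Int.mod tile_n 2 = 0 ∧ PySem.Int.mod (PySem.Int.floordiv tile_n 2) 32 = 0) ∨
   PySem.Int.mod tile_n 32 = 0)
instance (tile_m : Int) (tile_n : Int) : Decidable (Pre_pick_fp4_warp_shape_py tile_m tile_n) := by
  unfold Pre_pick_fp4_warp_shape_py; infer_instance

def pvWitness_pick_fp4_warp_shape_py : Int × Int := (64, 128)

def Spec_pick_fp4_warp_shape_py (tile_m : Int) (tile_n : Int) (out : Int × Int) : Prop := out = pick_fp4_warp_shape_py_alt tile_m tile_n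
instance (tile_m : Int) (tile_n : Int) (out : Int × Int) : Decidable (Spec_pick_fp4_warp_shape_py tile_m tile_n out) := by unfold Spec_pick_fp4_warp_shape_py; infer_instance

-- ===== CLAIM (what is proved, stated in full; the proofs are below) =====
def Claim_equal_pick_fp4_warp_shape_py : Prop := ∀ (tile_m : Int) (tile_n : Int), Dom_pick_fp4_warp_shape_py tile_m tile_n → Pre_pick_fp4_warp_shape_py tile_m tile_n → Spec_pick_fp4_warp_shape_py tile_m tile_n (pick_fp4_warp_shape_py tile_m tile_n)

-- ===== LEMMAS AND PROOFS =====

-- A's inner n-loop computes exactly B's flat first-match n-search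
lemma innerA_eq (tn : Int) :
    pickA_inner tn [4, 2, 1] = firstSuch (fun n =>
      PySem.Int.mod tn n = 0 ∧ PySem.Int.mod (PySem.Int.floordiv tn n) 32 = 0) [4, 2, 1] := by
  simp only [pickA_inner, firstSuch]
  split_ifs <;> tauto

-- ===== VERDICT (by name: the statement is the Claim_ definition above) =====
theorem pick_fp4_warp_shape_py_spec : Claim_equal_pick_fp4_warp_shape_py := by
  intro tm tn hd hp
  clear hd hp
  unfold Spec_pick_fp4_warp_shape_py pick_fp4_warp_shape_py pick_fp4_warp_shape_py_alt
  simp only [pickA_outer, innerA_eq]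
  generalize (firstSuch (fun n =>
      PySem.Int.mod tn n = 0 ∧ PySem.Int.mod (PySem.Int.floordiv tn n) 32 = 0) [4, 2, 1]) = r
  simp only [firstSuch]
  rcases r with _ | n0 <;> split_ifs <;> first | rfl | (exfalso; simp_all only [ne_eq, not_true_eq_false, not_not, false_and, and_false, and_true, not_false_eq_true])
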